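-- pv_equiv track=rewrite | github.com/calumpwebb/Spotty | app/permutations.py | generate_sentence_permutations_v2
-- ===== SOURCE A (Python) =====
-- def generate_sentence_permutations_v2(sentence, max_word_count):
--     words = sentence.split()
--     total_number_of_words = len(words)
--     memo = {}
--
--     def backtrack(start):
--         # Return memoized result if available
--         if start in memo:
--             return memo[start]
--
--         # Base case: If we've reached the end, return an empty grouping
--         if start == total_number_of_words:
--             return [[]]
--
--         local_result = []
--         for end in range(
--             start + 1, min(start + max_word_count + 1, total_number_of_words + 1)
--         ):
--             next_group = " ".join(words[start:end])
--             # Recursively get permutations for the remaining words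
--             for suffix in backtrack(end):
--                 local_result.append([next_group] + suffix)
--
--         # Memoize and return
--         memo[start] = local_result
--         return local_result
--
--     return backtrack(0)
-- ===== SOURCE B (Python) =====
-- def generate_sentence_permutations_v2(sentence, max_word_count):
--     words = sentence.split()
--     n = len(words)
--
--     # Stage 1: enumerate integer compositions of n with parts in 1..max_word_count
--     # (part sizes ascending at each position, matching the required ordering).
--     def comps(remaining):
--         if remaining == 0:
--             return [[]]
--         out = []
--         for size in range(1, min(max_word_count, remaining) + 1):
--             for rest in comps(remaining - size):
--                 out.append([size] + rest)
--         return out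
--
--     # Stage 2: render one composition into its joined word groups.
--     def render(comp):
--         groups = []
--         pos = 0
--         for size in comp:
--             groups.append(" ".join(words[pos:pos + size]))
--             pos += size
--         return groups
--
--     return [render(c) for c in comps(n)]
-- ===== Notes on version B (the rewrite author's own statement) =====
-- stated objective: alternative
-- what changed: Instead of one memoized backtrack that builds string groupings directly, B works in two stages over different data: it first enumerates the integer compositions of the word count with parts bounded by max_word_count, then renders each composition into joined word groups in a separate pass; the part-size enumeration order reproduces A's output order.
import Mathlib
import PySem

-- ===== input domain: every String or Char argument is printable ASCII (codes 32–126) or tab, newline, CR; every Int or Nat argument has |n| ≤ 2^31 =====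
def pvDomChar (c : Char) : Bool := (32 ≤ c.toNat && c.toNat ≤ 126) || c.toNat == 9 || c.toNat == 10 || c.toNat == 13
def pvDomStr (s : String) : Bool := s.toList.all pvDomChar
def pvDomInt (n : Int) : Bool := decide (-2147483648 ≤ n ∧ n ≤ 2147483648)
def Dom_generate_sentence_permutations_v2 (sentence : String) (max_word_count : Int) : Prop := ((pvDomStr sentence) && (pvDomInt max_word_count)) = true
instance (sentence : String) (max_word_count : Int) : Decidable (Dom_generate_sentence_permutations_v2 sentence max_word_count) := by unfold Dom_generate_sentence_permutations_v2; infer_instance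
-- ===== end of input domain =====

-- B replaces A's memoized string-building backtrack by two stages: enumerate
-- integer compositions of the word count, then render each composition to
-- joined word groups (objective: alternative decomposition, same outputs).

-- ===== PORT A =====
-- A's recursive backtrack(start); the memo dict is a pure cache of the same
-- values, so the port is the recursion itself.
-- 'range(start+1, min(start+max_word_count+1, n+1))' is ported by hand as
-- end = start+1+i for i < cnt (step 1, Int bounds; .attach only carries the
-- bound for termination): exact.
def pvBack (words : List String) (maxw : Int) (n : Nat) (start : Nat) : List (List String) :=
  if start = n then [[]]
  else
    let cnt := (min ((start : Int) + maxw + 1) ((n : Int) + 1) - ((start : Int) + 1)).toNat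
    ((List.range cnt).attach).foldl (fun acc i =>
      -- e := start+1+i, next_group := ' '.join(words[start:e]) (inlined)
      acc ++ (pvBack words maxw n (start + 1 + i.1)).map (fun suffix =>
        PySem.Str.join " " (PySem.List.slice words (some (start : Int)) (some ((start + 1 + i.1 : Nat) : Int))) :: suffix)) []
termination_by n - start
decreasing_by
  have := i.2
  simp [List.mem_range] at this
  omega

def generate_sentence_permutations_v2 (sentence : String) (max_word_count : Int) : List (List String) :=
  let words := PySem.Str.split₀ sentence
  pvBack words max_word_count words.length 0

-- ===== PORT B =====
-- stage 1: comps(remaining) — integer compositions with parts 1..max_word_count;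
-- 'range(1, min(max_word_count, remaining)+1)' ported by hand as size = 1+i for
-- i < (min maxw remaining).toNat (step 1, Int bounds): exact.
def pvComps (maxw : Int) : Nat → List (List Nat)
  | 0 => [[]]
  | (r+1) =>
    (List.range ((min maxw ((r : Int) + 1)).toNat)).foldl (fun acc i =>
      acc ++ (pvComps maxw (r - i)).map (fun rest => (1 + i) :: rest)) []

-- stage 2: render(comp) — a fold carrying (groups, pos)
def pvRenderStep (words : List String) (acc : List String × Nat) (size : Nat) : List String × Nat :=
  (acc.1 ++ [PySem.Str.join " " (PySem.List.slice words (some ((acc.2 : Nat) : Int)) (some ((acc.2 + size : Nat) : Int)))], acc.2 + size)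

def pvRender (words : List String) (comp : List Nat) : List String :=
  (comp.foldl (pvRenderStep words) ([], 0)).1

def generate_sentence_permutations_v2_alt (sentence : String) (max_word_count : Int) : List (List String) :=
  let words := PySem.Str.split₀ sentence
  (pvComps max_word_count words.length).map (pvRender words)

-- ===== PRECONDITION & SPEC =====
def Spec_generate_sentence_permutations_v2 (sentence : String) (max_word_count : Int) (out : List (List String)) : Prop := out = generate_sentence_permutations_v2_alt sentence max_word_count
instance (sentence : String) (max_word_count : Int) (out : List (List String)) : Decidable (Spec_generate_sentence_permutations_v2 sentence max_word_count out) := by unfold Spec_generate_sentence_permutations_v2; infer_instance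

-- ===== CLAIM (what is proved, stated in full; the proofs are below) =====
def Claim_equal_generate_sentence_permutations_v2 : Prop := ∀ (sentence : String) (max_word_count : Int), Dom_generate_sentence_permutations_v2 sentence max_word_count → Spec_generate_sentence_permutations_v2 sentence max_word_count (generate_sentence_permutations_v2 sentence max_word_count)

-- ===== LEMMAS AND PROOFS =====

theorem pv_foldl_attach {α β : Type} (l : List α) (g : β → α → β) (init : β) :
    l.attach.foldl (fun acc i => g acc i.1) init = l.foldl g init := by
  rw [List.foldl_attach]

-- render of a composition starting at position pos, in recursive form
def pvRenderFrom (words : List String) : Nat → List Nat → List String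
  | _, [] => []
  | pos, size :: rest =>
    PySem.Str.join " " (PySem.List.slice words (some ((pos : Nat) : Int)) (some ((pos + size : Nat) : Int)))
      :: pvRenderFrom words (pos + size) rest

theorem pvRender_foldl (words : List String) (comp : List Nat) :
    ∀ (pre : List String) (pos : Nat),
      (comp.foldl (pvRenderStep words) (pre, pos)).1 = pre ++ pvRenderFrom words pos comp := by
  induction comp with
  | nil => intro pre pos; simp [pvRenderFrom]
  | cons size rest ih =>
    intro pre pos
    simp only [List.foldl_cons, pvRenderStep, pvRenderFrom]
    rw [ih]
    simp

theorem pvRender_eq (words : List String) (comp : List Nat) :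
    pvRender words comp = pvRenderFrom words 0 comp := by
  rw [pvRender, pvRender_foldl]
  simp

theorem pvBack_eq_comps (words : List String) (maxw : Int) (n : Nat) :
    ∀ (k start : Nat), start ≤ n → n - start = k →
      pvBack words maxw n start = (pvComps maxw (n - start)).map (pvRenderFrom words start) := by
  intro k
  induction k using Nat.strong_induction_on with
  | _ k ih =>
    intro start hle hk
    by_cases hs : start = n
    · subst hs
      simp [pvBack, pvComps, pvRenderFrom]
    · have hlt : start < n := lt_of_le_of_ne hle hs
      have hk' : ∃ r, n - start = r + 1 := ⟨n - start - 1, by omega⟩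
      obtain ⟨r, hr⟩ := hk'
      rw [pvBack, if_neg hs, hr, pvComps]
      simp only []
      -- counts agree
      have hcnt : (min ((start : Int) + maxw + 1) ((n : Int) + 1) - ((start : Int) + 1)).toNat
          = (min maxw ((r : Int) + 1)).toNat := by
        have hnr : (n : Int) = (start : Int) + (r : Int) + 1 := by
          have : n = start + r + 1 := by omega
          rw [this]; push_cast; ring
        rw [hnr]; congr 1; omega
      rw [hcnt]
      have hattach := pv_foldl_attach
        (List.range ((min maxw ((r : Int) + 1)).toNat))
        (fun (acc : List (List String)) (i : Nat) =>
          acc ++ (pvBack words maxw n (start + 1 + i)).map (fun suffix =>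
            PySem.Str.join " " (PySem.List.slice words (some (start : Int)) (some ((start + 1 + i : Nat) : Int))) :: suffix))
        ([] : List (List String))
      simp only at hattach
      rw [hattach]
      rw [PySem.List.foldl_append_eq_flatMap, PySem.List.foldl_append_eq_flatMap]
      simp only [List.nil_append, List.map_flatMap]
      apply List.flatMap_congr
      intro i hi
      have hib : i < (min maxw ((r : Int) + 1)).toNat := List.mem_range.mp hi
      have hik : i ≤ r := by
        have : ((min maxw ((r : Int) + 1)).toNat : Int) ≤ (r : Int) + 1 := by
          rcases le_total maxw ((r : Int) + 1) with h | h
          · rw [min_eq_left h]; omega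
          · rw [min_eq_right h]; omega
        omega
      have hstep : n - (start + 1 + i) = r - i := by omega
      have hrec := ih (r - i) (by omega) (start + 1 + i) (by omega) hstep
      rw [hstep] at hrec
      rw [hrec]
      rw [List.map_map, List.map_map]
      apply List.map_congr_left
      intro rest _
      simp only [Function.comp_apply, pvRenderFrom]
      have : start + (1 + i) = start + 1 + i := by omega
      rw [this]

-- ===== VERDICT (by name: the statement is the Claim_ definition above) =====
theorem generate_sentence_permutations_v2_spec : Claim_equal_generate_sentence_permutations_v2 := by
  intro sentence maxw _
  show generate_sentence_permutations_v2 sentence maxw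
      = generate_sentence_permutations_v2_alt sentence maxw
  unfold generate_sentence_permutations_v2 generate_sentence_permutations_v2_alt
  rw [pvBack_eq_comps _ _ _ (((PySem.Str.split₀ sentence)).length) 0 (Nat.zero_le _) (by omega)]
  simp only [Nat.sub_zero]
  apply List.map_congr_left
  intro comp _
  exact (pvRender_eq _ comp).symm
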